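-- pv_equiv track=rewrite | github.com/AugustBugge/canonicalSystems | classify_coin_systems_rule2.py | tiny_dp_up_to
-- ===== SOURCE A (Python) =====
-- from typing import List, Tuple, Optional
--
-- INF = 10**9
--
-- def tiny_dp_up_to(limit: int, coins_asc: List[int]) -> List[int]:
--     """DP limited to amounts 0..limit with given coin set."""
--     dp = [INF] * (limit + 1)
--     dp[0] = 0
--     for x in range(1, limit + 1):
--         best = dp[x]
--         for c in coins_asc:
--             if c <= x:
--                 cand = dp[x - c] + 1
--                 if cand < best:
--                     best = cand
--         dp[x] = best
--     return dp
-- ===== SOURCE B (Python) =====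
-- from typing import List
--
-- INF = 10**9
--
-- def tiny_dp_up_to(limit: int, coins_asc: List[int]) -> List[int]:
--     """Breadth-first search over amounts: level d discovers exactly the amounts
--     that need d coins; amounts never reached keep the INF sentinel (levels are
--     capped at INF, the table's sentinel for 'unreachable')."""
--     dp = [INF] * (limit + 1)
--     dp[0] = 0
--     frontier = [0]
--     d = 0
--     while frontier and d < INF:
--         d += 1
--         nxt = []
--         for u in frontier:
--             for c in coins_asc:
--                 v = u + c
--                 if c > 0 and v <= limit and dp[v] == INF:
--                     dp[v] = d
--                     nxt.append(v)
--         frontier = nxt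
--     return dp
-- ===== Notes on version B (the rewrite author's own statement) =====
-- stated objective: alternative
-- what changed: The bottom-up table DP (for each amount, scan every coin and take the min of dp[x-c]+1) is replaced by a breadth-first search from amount 0: a frontier of newly reached amounts is expanded level by level, each level d writing d into the slots of amounts first reached with d coins; unreached slots keep the INF sentinel.
import Mathlib
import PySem

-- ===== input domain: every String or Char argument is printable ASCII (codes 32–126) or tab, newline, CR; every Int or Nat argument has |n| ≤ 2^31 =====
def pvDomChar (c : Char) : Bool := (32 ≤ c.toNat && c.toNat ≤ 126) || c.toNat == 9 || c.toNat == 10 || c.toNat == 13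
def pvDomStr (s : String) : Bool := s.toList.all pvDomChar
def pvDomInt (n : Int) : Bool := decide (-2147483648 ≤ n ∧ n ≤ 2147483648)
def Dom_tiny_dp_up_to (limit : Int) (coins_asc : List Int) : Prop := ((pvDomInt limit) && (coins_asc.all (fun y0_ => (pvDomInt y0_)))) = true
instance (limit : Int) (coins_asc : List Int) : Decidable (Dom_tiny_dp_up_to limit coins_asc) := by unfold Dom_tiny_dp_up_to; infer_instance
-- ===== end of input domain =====

-- B replaces the bottom-up table DP by a breadth-first search from amount 0 that
-- expands a frontier level by level; same returned table on all admitted inputs.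

def pvINF : Int := 10 ^ 9

-- ===== PORT A =====
def tiny_dp_up_to (limit : Int) (coins_asc : List Int) : List Int :=
  let dp0 := PySem.List.pySetD (PySem.List.pyRepeat [pvINF] (limit + 1)) 0 0
  (PySem.List.pyRange 1 (limit + 1) 1).foldl (fun dp x =>
    let best0 := PySem.List.pyGetD dp x 0
    let best := coins_asc.foldl (fun best c =>
      if c ≤ x then
        let cand := PySem.List.pyGetD dp (x - c) 0 + 1
        if cand < best then cand else best
      else best) best0
    PySem.List.pySetD dp x best) dp0

-- ===== PORT B =====
-- B's while loop: state (dp, frontier, d); the fuel argument (limit+2 at the call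
-- site) is only a totality device — the loop runs at most limit+1 levels (each
-- nonempty frontier holds fresh amounts of [1..limit]) and never past d = INF.
def pvBfsLoop (limit : Int) (cs : List Int) : Nat → List Int → List Int → Int → List Int
  | 0, dp, _, _ => dp
  | fuel + 1, dp, frontier, d =>
    if frontier ≠ [] ∧ d < pvINF then
      let d' := d + 1
      let st := frontier.foldl (fun (st : List Int × List Int) u =>
        cs.foldl (fun (st : List Int × List Int) c =>
          let v := u + c
          if 0 < c ∧ v ≤ limit ∧ PySem.List.pyGetD st.1 v 0 = pvINF then
            (PySem.List.pySetD st.1 v d', st.2 ++ [v])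
          else st) st) (dp, [])
      pvBfsLoop limit cs fuel st.1 st.2 d'
    else dp

def tiny_dp_up_to_alt (limit : Int) (coins_asc : List Int) : List Int :=
  let dp0 := PySem.List.pySetD (PySem.List.pyRepeat [pvINF] (limit + 1)) 0 0
  pvBfsLoop limit coins_asc (limit.toNat + 2) dp0 [0] 0

-- ===== PRECONDITION & SPEC =====
-- Pre_ excludes exactly the inputs on which the Python A raises IndexError:
-- limit < 0 (dp[0] = 0 on an empty list), and limit ≥ 1 with a negative coin
-- (dp[x - c] eventually indexes past the end of dp).
def Pre_tiny_dp_up_to (limit : Int) (coins_asc : List Int) : Prop :=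
  0 ≤ limit ∧ (limit = 0 ∨ ∀ c ∈ coins_asc, 0 ≤ c)
instance (limit : Int) (coins_asc : List Int) : Decidable (Pre_tiny_dp_up_to limit coins_asc) := by unfold Pre_tiny_dp_up_to; infer_instance

def pvWitness_tiny_dp_up_to : Int × List Int := (3, [1, 2])

def Spec_tiny_dp_up_to (limit : Int) (coins_asc : List Int) (out : List Int) : Prop := out = tiny_dp_up_to_alt limit coins_asc
instance (limit : Int) (coins_asc : List Int) (out : List Int) : Decidable (Spec_tiny_dp_up_to limit coins_asc out) := by unfold Spec_tiny_dp_up_to; infer_instance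

-- ===== CLAIM (what is proved, stated in full; the proofs are below) =====
def Claim_equal_tiny_dp_up_to : Prop := ∀ (limit : Int) (coins_asc : List Int), Dom_tiny_dp_up_to limit coins_asc → Pre_tiny_dp_up_to limit coins_asc → Spec_tiny_dp_up_to limit coins_asc (tiny_dp_up_to limit coins_asc)


-- ===== LEMMAS AND PROOFS =====

-- Reference DP table: pvMtab cs n is the table of capped min-coin counts for
-- amounts 0..n; pvMv cs x its value at x.
def pvMstep (cs : List Int) (t : List Int) (x : Nat) : Int :=
  cs.foldl (fun b c => if 1 ≤ c ∧ c ≤ (x : Int) then min b (t.getD (x - c.toNat) 0 + 1) else b) pvINF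

def pvMtab (cs : List Int) : Nat → List Int
  | 0 => [0]
  | n+1 => pvMtab cs n ++ [pvMstep cs (pvMtab cs n) (n+1)]

def pvMv (cs : List Int) (x : Nat) : Int := (pvMtab cs x).getD x 0

theorem pvMtab_length (cs : List Int) (n : Nat) : (pvMtab cs n).length = n + 1 := by
  induction n with
  | zero => rfl
  | succ n ih => simp [pvMtab, ih]

theorem pvMtab_getD (cs : List Int) {i n : Nat} (h : i ≤ n) :
    (pvMtab cs n).getD i 0 = pvMv cs i := by
  induction n with
  | zero => interval_cases i; rfl
  | succ n ih =>
    rcases Nat.lt_or_ge i (n+1) with hlt | hge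
    · rw [pvMv] at *
      have : (pvMtab cs (n+1)).getD i 0 = (pvMtab cs n).getD i 0 := by
        simp [pvMtab, List.getD, List.getElem?_append_left (by rw [pvMtab_length]; omega : i < (pvMtab cs n).length)]
      rw [this, ih (by omega)]
    · have : i = n + 1 := by omega
      subst this; rfl

theorem pvMtab_eq_map (cs : List Int) (n : Nat) :
    pvMtab cs n = (List.range (n+1)).map (pvMv cs) := by
  apply List.ext_getElem
  · simp [pvMtab_length]
  · intro i h1 h2
    have hi : i ≤ n := by simpa [pvMtab_length] using h1
    have := pvMtab_getD cs hi
    simp only [List.getD, List.getElem?_eq_getElem h1, Option.getD_some] at this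
    simpa [this] using rfl

theorem pvMv_zero (cs : List Int) : pvMv cs 0 = 0 := rfl

theorem pvMv_succ (cs : List Int) (n : Nat) :
    pvMv cs (n+1) = pvMstep cs (pvMtab cs n) (n+1) := by
  rw [pvMv]
  simp [pvMtab, List.getD, List.getElem?_append_right (by rw [pvMtab_length] : (pvMtab cs n).length ≤ n+1), pvMtab_length]

-- Generic lemmas about the fold  foldl (fun b c => if P c then min b (f c) else b)
theorem pvFold_le_init (l : List Int) (P : Int → Prop) [DecidablePred P] (f : Int → Int) (b : Int) :
    l.foldl (fun b c => if P c then min b (f c) else b) b ≤ b := by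
  induction l generalizing b with
  | nil => simp
  | cons c l ih =>
    simp only [List.foldl_cons]
    refine le_trans (ih _) ?_
    split <;> simp [min_le_left]

theorem pvFold_le_term (l : List Int) (P : Int → Prop) [DecidablePred P] (f : Int → Int) (b : Int)
    {c : Int} (hc : c ∈ l) (hP : P c) :
    l.foldl (fun b c => if P c then min b (f c) else b) b ≤ f c := by
  induction l generalizing b with
  | nil => cases hc
  | cons c' l ih =>
    simp only [List.foldl_cons]
    rcases List.mem_cons.1 hc with rfl | hc'
    · refine le_trans (pvFold_le_init _ _ _ _) ?_
      simp [hP, min_le_right]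
    · exact ih _ hc'

theorem pvFold_ge (l : List Int) (P : Int → Prop) [DecidablePred P] (f : Int → Int) (b r : Int)
    (hb : r ≤ b) (h : ∀ c ∈ l, P c → r ≤ f c) :
    r ≤ l.foldl (fun b c => if P c then min b (f c) else b) b := by
  induction l generalizing b with
  | nil => simpa
  | cons c l ih =>
    simp only [List.foldl_cons]
    refine ih (b := _) ?_ (fun c hc hP => h c (List.mem_cons_of_mem _ hc) hP)
    split
    · exact le_min hb (h c (List.mem_cons_self) (by assumption))
    · exact hb

theorem pvFold_congr (l : List Int) (P : Int → Prop) [DecidablePred P] (f g : Int → Int) (b : Int)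
    (h : ∀ c ∈ l, P c → f c = g c) :
    l.foldl (fun b c => if P c then min b (f c) else b) b =
      l.foldl (fun b c => if P c then min b (g c) else b) b := by
  induction l generalizing b with
  | nil => rfl
  | cons c l ih =>
    simp only [List.foldl_cons]
    rw [show (if P c then min b (f c) else b) = (if P c then min b (g c) else b) by
      split
      · rw [h c (List.mem_cons_self) (by assumption)]
      · rfl]
    exact ih _ (fun c hc hP => h c (List.mem_cons_of_mem _ hc) hP)

-- A result of the min-fold is its base or one of its admitted terms.
theorem pvFold_attains (l : List Int) (P : Int → Prop) [DecidablePred P] (f : Int → Int) (b : Int) :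
    l.foldl (fun b c => if P c then min b (f c) else b) b = b ∨
      ∃ c ∈ l, P c ∧ l.foldl (fun b c => if P c then min b (f c) else b) b = f c := by
  induction l generalizing b with
  | nil => left; rfl
  | cons c l ih =>
    simp only [List.foldl_cons]
    by_cases hP : P c
    · rw [if_pos hP]
      rcases ih (min b (f c)) with h | ⟨c', hc', hP', h⟩
      · rcases min_choice b (f c) with hm | hm
        · left; rw [h, hm]
        · right; exact ⟨c, List.mem_cons_self, hP, by rw [h, hm]⟩
      · right; exact ⟨c', List.mem_cons_of_mem _ hc', hP', h⟩
    · rw [if_neg hP]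
      rcases ih b with h | ⟨c', hc', hP', h⟩
      · left; exact h
      · right; exact ⟨c', List.mem_cons_of_mem _ hc', hP', h⟩

-- Working form of the recurrence
theorem pvMv_fold (cs : List Int) (n : Nat) :
    pvMv cs (n+1) = cs.foldl (fun b c => if 1 ≤ c ∧ c ≤ ((n:Int)+1) then min b (pvMv cs ((n+1) - c.toNat) + 1) else b) pvINF := by
  rw [pvMv_succ, pvMstep]
  refine pvFold_congr cs (fun c => 1 ≤ c ∧ c ≤ ((n:Int)+1)) _ _ _ ?_
  intro c _ hP
  rw [pvMtab_getD cs (by omega : (n+1) - c.toNat ≤ n)]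

theorem pvMv_le_INF (cs : List Int) (x : Nat) : pvMv cs x ≤ pvINF := by
  cases x with
  | zero => rw [pvMv_zero]; norm_num [pvINF]
  | succ n => rw [pvMv_fold]; exact pvFold_le_init _ _ _ _

theorem pvMv_step_le (cs : List Int) {c : Int} {x : Nat} (hc : c ∈ cs) (h1 : 1 ≤ c) (hx : c ≤ (x:Int)) :
    pvMv cs x ≤ pvMv cs (x - c.toNat) + 1 := by
  obtain ⟨n, rfl⟩ : ∃ n, x = n + 1 := ⟨x - 1, by omega⟩
  rw [pvMv_fold]
  exact pvFold_le_term _ _ _ _ hc ⟨h1, by exact_mod_cast hx⟩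

theorem pvMv_nonneg (cs : List Int) (x : Nat) : 0 ≤ pvMv cs x := by
  induction x using Nat.strong_induction_on with
  | _ x ih =>
    cases x with
    | zero => rw [pvMv_zero]
    | succ n =>
      rw [pvMv_fold]
      refine pvFold_ge _ _ _ _ _ (by norm_num [pvINF]) ?_
      intro c _ hP
      have := ih ((n+1) - c.toNat) (by omega)
      omega

theorem pvMv_pos (cs : List Int) (n : Nat) : 1 ≤ pvMv cs (n+1) := by
  rw [pvMv_fold]
  refine pvFold_ge _ _ _ _ _ (by norm_num [pvINF]) ?_
  intro c _ hP
  have := pvMv_nonneg cs ((n+1) - c.toNat)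
  omega

-- A finite value of the table at a positive amount is attained through some coin.
theorem pvMv_pred (cs : List Int) (n : Nat) (h : pvMv cs (n+1) < pvINF) :
    ∃ c ∈ cs, 1 ≤ c ∧ c ≤ (n:Int)+1 ∧ pvMv cs ((n+1) - c.toNat) = pvMv cs (n+1) - 1 := by
  rcases pvFold_attains cs (fun c => 1 ≤ c ∧ c ≤ ((n:Int)+1)) (fun c => pvMv cs ((n+1) - c.toNat) + 1) pvINF with hb | ⟨c, hc, hP, he⟩
  · rw [pvMv_fold] at h; omega
  · refine ⟨c, hc, hP.1, hP.2, ?_⟩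
    rw [pvMv_fold] at *
    omega

theorem pvMv_le_self (cs : List Int) (x : Nat) (h : pvMv cs x < pvINF) : pvMv cs x ≤ (x:Int) := by
  induction x using Nat.strong_induction_on with
  | _ x ih =>
    cases x with
    | zero => rw [pvMv_zero]; exact_mod_cast Nat.zero_le 0
    | succ n =>
      obtain ⟨c, hc, h1, hx, hpred⟩ := pvMv_pred cs n h
      have hlt : (n+1) - c.toNat < n+1 := by omega
      have := ih ((n+1) - c.toNat) hlt (by omega)
      omega

-- Walking the predecessor chain down to a prescribed lower level.
theorem pvLevel_down (cs : List Int) (d : Int) (hd : 0 ≤ d) :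
    ∀ (k : Nat) (i : Nat), pvMv cs i < pvINF → pvMv cs i = d + (k:Int) →
      ∃ j : Nat, j ≤ i ∧ pvMv cs j = d := by
  intro k
  induction k with
  | zero => intro i _ h; exact ⟨i, le_refl _, by simpa using h⟩
  | succ k ih =>
    intro i hfin h
    obtain ⟨n, rfl⟩ : ∃ n, i = n + 1 := by
      rcases i with _ | n
      · exfalso; rw [pvMv_zero] at h; omega
      · exact ⟨n, rfl⟩
    obtain ⟨c, hc, h1, hx, hpred⟩ := pvMv_pred cs n hfin
    obtain ⟨j, hj, hjd⟩ := ih ((n+1) - c.toNat) (by omega) (by push_cast at h ⊢; omega)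
    exact ⟨j, by omega, hjd⟩

-- small list utilities
theorem pvMap_range_congr (m : Nat) (f g : Nat → Int) (h : ∀ i < m, f i = g i) :
    (List.range m).map f = (List.range m).map g :=
  List.map_congr_left (fun i hi => h i (List.mem_range.mp hi))

theorem pvSet_map_range (m : Nat) (f : Nat → Int) (y : Nat) (v : Int) (hy : y < m) :
    ((List.range m).map f).set y v = (List.range m).map (fun i => if i = y then v else f i) := by
  apply List.ext_getElem
  · simp
  · intro i h1 h2
    have him : i < m := by simpa using h2
    simp only [List.getElem_set, List.getElem_map, List.getElem_range]
    by_cases hiy : y = i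
    · subst hiy; simp
    · rw [if_neg hiy, if_neg (fun h => hiy h.symm)]

theorem pvDp0 (limit : Int) (hl : 0 ≤ limit) :
    PySem.List.pySetD (PySem.List.pyRepeat [pvINF] (limit + 1)) 0 0 =
      0 :: List.replicate limit.toNat pvINF := by
  rw [PySem.List.pyRepeat_singleton, PySem.List.pySetD_of_nonneg _ _ (le_refl 0)]
  rw [show (limit+1).toNat = limit.toNat + 1 by omega, List.replicate_succ]
  simp

theorem pvCons_replicate_eq_map (N : Nat) (f : Nat → Int) (h0 : f 0 = 0)
    (hpos : ∀ i, 1 ≤ i → i ≤ N → f i = pvINF) :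
    (0 : Int) :: List.replicate N pvINF = (List.range (N+1)).map f := by
  apply List.ext_getElem
  · simp
  · intro i h1 h2
    cases i with
    | zero => simpa using h0.symm
    | succ n =>
      have hn : n < N := by simpa using h1
      simp [hpos (n+1) (by omega) (by omega)]

-- A's inner coin scan equals the reference fold (coins nonneg; accumulator ≤ INF).
theorem pvA_inner (cs0 : List Int) (N k : Nat) (hk : k < N) :
    ∀ (cs : List Int), (∀ c ∈ cs, 0 ≤ c) → ∀ b : Int, b ≤ pvINF →
    cs.foldl (fun best c =>
        if c ≤ ((k:Int)+1) then
          (if PySem.List.pyGetD ((List.range (N+1)).map (fun i => if i ≤ k then pvMv cs0 i else pvINF)) (((k:Int)+1) - c) 0 + 1 < best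
           then PySem.List.pyGetD ((List.range (N+1)).map (fun i => if i ≤ k then pvMv cs0 i else pvINF)) (((k:Int)+1) - c) 0 + 1
           else best)
        else best) b
    = cs.foldl (fun b c => if 1 ≤ c ∧ c ≤ ((k:Int)+1) then min b (pvMv cs0 ((k+1) - c.toNat) + 1) else b) b := by
  intro cs
  induction cs with
  | nil => intro _ b _; rfl
  | cons c cs ih =>
    intro hcs b hb
    have hc0 : 0 ≤ c := hcs c List.mem_cons_self
    simp only [List.foldl_cons]
    by_cases hcx : c ≤ (k:Int)+1
    · by_cases hc1 : 1 ≤ c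
      · have hidx : PySem.List.pyGetD ((List.range (N+1)).map (fun i => if i ≤ k then pvMv cs0 i else pvINF)) (((k:Int)+1) - c) 0 = pvMv cs0 ((k+1) - c.toNat) := by
          rw [show ((k:Int)+1) - c = ((k+1 - c.toNat : Nat) : Int) by omega,
            PySem.List.pyGetD_natCast, PySem.List.getD_map_range _ _ _ _ (by omega),
            if_pos (by omega : k+1 - c.toNat ≤ k)]
        rw [if_pos hcx, hidx, if_pos (show (1:Int) ≤ c ∧ c ≤ (k:Int)+1 from ⟨hc1, hcx⟩)]
        rw [show (if pvMv cs0 (k+1 - c.toNat) + 1 < b then pvMv cs0 (k+1 - c.toNat) + 1 else b) = min b (pvMv cs0 (k+1 - c.toNat) + 1) by omega]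
        exact ih (fun c hc => hcs c (List.mem_cons_of_mem _ hc)) _ (le_trans (min_le_left _ _) hb)
      · have hceq : c = 0 := by omega
        subst hceq
        rw [if_pos hcx, if_neg (by omega : ¬ ((1:Int) ≤ 0 ∧ (0:Int) ≤ (k:Int)+1))]
        have hidx : PySem.List.pyGetD ((List.range (N+1)).map (fun i => if i ≤ k then pvMv cs0 i else pvINF)) (((k:Int)+1) - 0) 0 = pvINF := by
          rw [show ((k:Int)+1) - 0 = ((k+1 : Nat) : Int) by push_cast; ring,
            PySem.List.pyGetD_natCast, PySem.List.getD_map_range _ _ _ _ (by omega),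
            if_neg (by omega)]
        rw [hidx, if_neg (by omega)]
        exact ih (fun c hc => hcs c (List.mem_cons_of_mem _ hc)) b hb
    · rw [if_neg hcx, if_neg (by omega : ¬ (1 ≤ c ∧ c ≤ (k:Int)+1))]
      exact ih (fun c hc => hcs c (List.mem_cons_of_mem _ hc)) b hb

-- A's outer loop invariant.
theorem pvA_loop (limit : Int) (hl : 0 ≤ limit) (cs : List Int) (hcs : ∀ c ∈ cs, 0 ≤ c)
    (k : Nat) (hk : k ≤ limit.toNat) :
    (PySem.List.pyRange 1 ((k:Int) + 1) 1).foldl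
      (fun dp x =>
        PySem.List.pySetD dp x (cs.foldl (fun best c =>
          if c ≤ x then
            (if PySem.List.pyGetD dp (x - c) 0 + 1 < best then PySem.List.pyGetD dp (x - c) 0 + 1 else best)
          else best) (PySem.List.pyGetD dp x 0)))
      ((List.range (limit.toNat+1)).map (fun i => if i ≤ 0 then pvMv cs i else pvINF))
    = (List.range (limit.toNat+1)).map (fun i => if i ≤ k then pvMv cs i else pvINF) := by
  induction k with
  | zero => rw [PySem.List.pyRange_one_eq_nil (by simp)]; rfl
  | succ k ih =>
    have hsplit : PySem.List.pyRange 1 (((k+1:Nat):Int) + 1) 1 = PySem.List.pyRange 1 ((k:Int)+1) 1 ++ [(k:Int)+1] := by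
      rw [show ((k+1:Nat):Int) + 1 = ((k:Int)+1) + 1 by push_cast; ring,
        PySem.List.pyRange_one_succ_right (by omega)]
    rw [hsplit, List.foldl_append, ih (by omega)]
    simp only [List.foldl_cons, List.foldl_nil]
    have hread : PySem.List.pyGetD ((List.range (limit.toNat+1)).map (fun i => if i ≤ k then pvMv cs i else pvINF)) ((k:Int)+1) 0 = pvINF := by
      rw [show (k:Int)+1 = ((k+1:Nat):Int) by push_cast; ring,
        PySem.List.pyGetD_natCast, PySem.List.getD_map_range _ _ _ _ (by omega),
        if_neg (by omega)]
    rw [hread, pvA_inner cs limit.toNat k (by omega) cs hcs pvINF (le_refl _), ← pvMv_fold]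
    rw [show (k:Int)+1 = ((k+1:Nat):Int) by push_cast; ring,
      PySem.List.pySetD_natCast, pvSet_map_range _ _ _ _ (by omega)]
    apply pvMap_range_congr
    intro i hi
    by_cases hiy : i = k+1
    · subst hiy; rw [if_pos rfl, if_pos (by omega)]
    · rw [if_neg hiy]
      by_cases hik : i ≤ k
      · rw [if_pos hik, if_pos (by omega)]
      · rw [if_neg hik, if_neg (by omega)]

theorem pvA_eq (limit : Int) (cs : List Int) (hl : 0 ≤ limit) (hcs : limit = 0 ∨ ∀ c ∈ cs, 0 ≤ c) :
    tiny_dp_up_to limit cs = pvMtab cs limit.toNat := by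
  show (PySem.List.pyRange 1 (limit+1) 1).foldl
      (fun dp x =>
        PySem.List.pySetD dp x (cs.foldl (fun best c =>
          if c ≤ x then
            (if PySem.List.pyGetD dp (x - c) 0 + 1 < best then PySem.List.pyGetD dp (x - c) 0 + 1 else best)
          else best) (PySem.List.pyGetD dp x 0)))
      (PySem.List.pySetD (PySem.List.pyRepeat [pvINF] (limit + 1)) 0 0)
    = pvMtab cs limit.toNat
  rcases hcs with h0 | hcs
  · subst h0
    rw [PySem.List.pyRange_one_eq_nil (by norm_num), List.foldl_nil, pvDp0 0 (le_refl 0)]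
    rfl
  · rw [pvDp0 limit hl,
      pvCons_replicate_eq_map limit.toNat (fun i => if i ≤ 0 then pvMv cs i else pvINF)
        (by simp [pvMv_zero]) (fun i h1 _ => by
          show (if i ≤ 0 then pvMv cs i else pvINF) = pvINF
          rw [if_neg (by omega)]),
      show limit + 1 = ((limit.toNat : Nat) : Int) + 1 by omega,
      pvA_loop limit hl cs hcs limit.toNat (le_refl _), pvMtab_eq_map]
    apply pvMap_range_congr
    intro i hi
    rw [if_pos (by omega)]

-- ===== B-side proof: BFS level invariant =====

-- Named forms of B's inner fold steps (definitionally equal to the port's lambdas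
-- once limit is written as a Nat cast).
def pvStepC (N : Nat) (d : Int) (u : Int) (st : List Int × List Int) (c : Int) : List Int × List Int :=
  let v := u + c
  if 0 < c ∧ v ≤ ((N:Nat):Int) ∧ PySem.List.pyGetD st.1 v 0 = pvINF then
    (PySem.List.pySetD st.1 v (d+1), st.2 ++ [v])
  else st

def pvExpand (cs : List Int) (N : Nat) (d : Int) (fr : List Int) (st : List Int × List Int) : List Int × List Int :=
  fr.foldl (fun st u => cs.foldl (pvStepC N d u) st) st

-- dp picture while a level is being expanded: finalized values ≤ d, the slots of
-- the already discovered level-(d+1) amounts hold d+1, everything else INF.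
def pvLevelF (cs : List Int) (d : Int) (nxt : List Int) (i : Nat) : Int :=
  if pvMv cs i ≤ d then pvMv cs i
  else if pvMv cs i = d + 1 ∧ (i:Int) ∈ nxt then d + 1
  else pvINF

def pvStInv (cs : List Int) (N : Nat) (d : Int) (st : List Int × List Int) : Prop :=
  st.1 = (List.range (N+1)).map (pvLevelF cs d st.2) ∧
  ∀ v ∈ st.2, ∃ vn : Nat, v = (vn:Int) ∧ vn ≤ N ∧ pvMv cs vn = d + 1

-- One coin step of one frontier element.
theorem pvStepC_inv (cs : List Int) (N : Nat) (d : Int) (hdINF : d < pvINF)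
    (u : Int) (un : Nat) (hu : u = (un:Int)) (huN : un ≤ N) (hud : pvMv cs un = d)
    (st : List Int × List Int) (hst : pvStInv cs N d st) (c : Int) (hcs : c ∈ cs) :
    pvStInv cs N d (pvStepC N d u st c) ∧
    (∀ x ∈ st.2, x ∈ (pvStepC N d u st c).2) ∧
    (1 ≤ c → u + c ≤ (N:Int) → pvMv cs (un + c.toNat) = d + 1 → u + c ∈ (pvStepC N d u st c).2) := by
  rw [pvStepC]
  by_cases hg : 0 < c ∧ u + c ≤ (N:Int) ∧ PySem.List.pyGetD st.1 (u + c) 0 = pvINF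
  · rw [if_pos hg]
    obtain ⟨hcpos, hvN, hread⟩ := hg
    have hvn : u + c = ((un + c.toNat : Nat) : Int) := by omega
    have hvnN : un + c.toNat ≤ N := by omega
    rw [hst.1, hvn, PySem.List.pyGetD_natCast,
      PySem.List.getD_map_range _ _ _ _ (by omega)] at hread
    have hvlvl : pvMv cs (un + c.toNat) = d + 1 := by
      have hle : pvMv cs (un + c.toNat) ≤ d + 1 := by
        have := pvMv_step_le cs hcs (by omega : 1 ≤ c) (by omega : c ≤ ((un + c.toNat : Nat) : Int))
        rw [show un + c.toNat - c.toNat = un by omega, hud] at this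
        exact this
      by_contra hne
      have hlt : pvMv cs (un + c.toNat) ≤ d := by omega
      simp only [pvLevelF] at hread
      rw [if_pos hlt] at hread
      have := pvMv_le_INF cs (un + c.toNat)
      omega
    refine ⟨⟨?_, ?_⟩, ?_, ?_⟩
    · show PySem.List.pySetD st.1 (u + c) (d+1) = (List.range (N+1)).map (pvLevelF cs d (st.2 ++ [u + c]))
      rw [hst.1, hvn, PySem.List.pySetD_natCast, pvSet_map_range _ _ _ _ (by omega)]
      apply pvMap_range_congr
      intro i hi
      by_cases hieq : i = un + c.toNat
      · subst hieq
        rw [if_pos rfl]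
        simp only [pvLevelF]
        rw [if_neg (by omega), if_pos ⟨hvlvl, by rw [← hvn]; simp⟩]
      · rw [if_neg hieq]
        simp only [pvLevelF]
        have hmemif : (i:Int) ∈ st.2 ++ [((un + c.toNat : Nat) : Int)] → (i:Int) ∈ st.2 := by
          intro h
          rcases List.mem_append.1 h with h | h
          · exact h
          · exfalso; rw [List.mem_singleton] at h; exact hieq (by exact_mod_cast h)
        by_cases hA : pvMv cs i ≤ d
        · rw [if_pos hA, if_pos hA]
        · rw [if_neg hA, if_neg hA]
          by_cases hB : pvMv cs i = d + 1 ∧ (i:Int) ∈ st.2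
          · rw [if_pos hB, if_pos ⟨hB.1, List.mem_append.2 (Or.inl hB.2)⟩]
          · rw [if_neg hB, if_neg (fun h => hB ⟨h.1, hmemif h.2⟩)]
    · intro v hv
      rcases List.mem_append.1 hv with h | h
      · exact hst.2 v h
      · rw [List.mem_singleton] at h
        exact ⟨un + c.toNat, by rw [h, hvn], hvnN, hvlvl⟩
    · intro x hx
      exact List.mem_append.2 (Or.inl hx)
    · intro _ _ _
      exact List.mem_append.2 (Or.inr (List.mem_singleton.2 rfl))
  · rw [if_neg hg]
    refine ⟨hst, fun x hx => hx, ?_⟩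
    intro hc1 hvN hvlvl
    -- the gate failed although 0 < c and v ≤ N: the slot is no longer INF,
    -- so v was discovered earlier and is already in st.2.
    have hread : PySem.List.pyGetD st.1 (u + c) 0 ≠ pvINF := by
      intro h; exact hg ⟨by omega, hvN, h⟩
    have hvn : u + c = ((un + c.toNat : Nat) : Int) := by omega
    have hvnN : un + c.toNat ≤ N := by omega
    rw [hst.1, hvn, PySem.List.pyGetD_natCast,
      PySem.List.getD_map_range _ _ _ _ (by omega)] at hread
    simp only [pvLevelF] at hread
    rw [if_neg (by omega : ¬ (pvMv cs (un + c.toNat) ≤ d))] at hread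
    by_cases hmem : ((un + c.toNat : Nat) : Int) ∈ st.2
    · rw [hvn]; exact hmem
    · exfalso
      rw [if_neg (by exact fun h => hmem h.2)] at hread
      exact hread rfl

-- One frontier element's whole coin scan.
theorem pvInnerFold (cs : List Int) (N : Nat) (d : Int) (hdINF : d < pvINF)
    (u : Int) (un : Nat) (hu : u = (un:Int)) (huN : un ≤ N) (hud : pvMv cs un = d) :
    ∀ (l : List Int), (∀ c ∈ l, c ∈ cs) → ∀ st, pvStInv cs N d st →
    pvStInv cs N d (l.foldl (pvStepC N d u) st) ∧
    (∀ x ∈ st.2, x ∈ (l.foldl (pvStepC N d u) st).2) ∧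
    (∀ c ∈ l, 1 ≤ c → u + c ≤ (N:Int) → pvMv cs (un + c.toNat) = d + 1 →
      u + c ∈ (l.foldl (pvStepC N d u) st).2) := by
  intro l
  induction l with
  | nil => intro _ st hst; exact ⟨hst, fun x hx => hx, fun c hc => absurd hc (List.not_mem_nil)⟩
  | cons c l ih =>
    intro hl st hst
    simp only [List.foldl_cons]
    obtain ⟨hst1, hmono1, hcov1⟩ :=
      pvStepC_inv cs N d hdINF u un hu huN hud st hst c (hl c List.mem_cons_self)
    obtain ⟨hst2, hmono2, hcov2⟩ := ih (fun c hc => hl c (List.mem_cons_of_mem _ hc)) _ hst1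
    refine ⟨hst2, fun x hx => hmono2 x (hmono1 x hx), ?_⟩
    intro c' hc' h1 h2 h3
    rcases List.mem_cons.1 hc' with rfl | hc'mem
    · exact hmono2 _ (hcov1 h1 h2 h3)
    · exact hcov2 c' hc'mem h1 h2 h3

-- The whole frontier's expansion.
theorem pvOuterFold (cs : List Int) (N : Nat) (d : Int) (hdINF : d < pvINF) :
    ∀ (fl : List Int), (∀ u ∈ fl, ∃ un : Nat, u = (un:Int) ∧ un ≤ N ∧ pvMv cs un = d) →
    ∀ st, pvStInv cs N d st →
    pvStInv cs N d (pvExpand cs N d fl st) ∧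
    (∀ x ∈ st.2, x ∈ (pvExpand cs N d fl st).2) ∧
    (∀ u ∈ fl, ∀ un : Nat, u = (un:Int) → ∀ c ∈ cs, 1 ≤ c → u + c ≤ (N:Int) →
      pvMv cs (un + c.toNat) = d + 1 → u + c ∈ (pvExpand cs N d fl st).2) := by
  intro fl
  induction fl with
  | nil => intro _ st hst; exact ⟨hst, fun x hx => hx, fun u hu => absurd hu (List.not_mem_nil)⟩
  | cons u fl ih =>
    intro hfl st hst
    obtain ⟨un, hu, huN, hud⟩ := hfl u List.mem_cons_self
    obtain ⟨hst1, hmono1, hcov1⟩ :=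
      pvInnerFold cs N d hdINF u un hu huN hud cs (fun c hc => hc) st hst
    obtain ⟨hst2, hmono2, hcov2⟩ := ih (fun u hu => hfl u (List.mem_cons_of_mem _ hu)) _ hst1
    have hexp : pvExpand cs N d (u :: fl) st = pvExpand cs N d fl (cs.foldl (pvStepC N d u) st) := rfl
    rw [hexp]
    refine ⟨hst2, fun x hx => hmono2 x (hmono1 x hx), ?_⟩
    intro u' hu' un' hu'e c hc h1 h2 h3
    rcases List.mem_cons.1 hu' with rfl | hu'mem
    · have hun : un' = un := by omega
      subst hun
      exact hmono2 _ (hcov1 c hc h1 h2 h3)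
    · exact hcov2 u' hu'mem un' hu'e c hc h1 h2 h3

-- The BFS loop, started on the finalized-through-level-d table with the level-d
-- frontier, computes the full reference table.
theorem pvLoop_eq (cs : List Int) (N : Nat) :
    ∀ (fuel : Nat) (d : Int) (fr : List Int), 0 ≤ d → (N:Int) - d < (fuel:Int) →
    (∀ u ∈ fr, ∃ un : Nat, u = (un:Int) ∧ un ≤ N ∧ pvMv cs un = d) →
    (d < pvINF → ∀ i : Nat, i ≤ N → pvMv cs i = d → (i:Int) ∈ fr) →
    pvBfsLoop ((N:Nat):Int) cs fuel
      ((List.range (N+1)).map (fun i => if pvMv cs i ≤ d then pvMv cs i else pvINF)) fr d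
    = (List.range (N+1)).map (pvMv cs) := by
  intro fuel
  induction fuel with
  | zero =>
    intro d fr hd hfuel hmem hcomp
    rw [pvBfsLoop]
    apply pvMap_range_congr
    intro i hi
    by_cases hle : pvMv cs i ≤ d
    · rw [if_pos hle]
    · rw [if_neg hle]
      rcases lt_or_ge (pvMv cs i) pvINF with hfin | hinf
      · exfalso; have := pvMv_le_self cs i hfin; omega
      · have := pvMv_le_INF cs i; omega
  | succ fuel ih =>
    intro d fr hd hfuel hmem hcomp
    rw [pvBfsLoop]
    by_cases hg : fr ≠ [] ∧ d < pvINF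
    · rw [if_pos hg]
      simp only []
      have hst0 : pvStInv cs N d ((List.range (N+1)).map (fun i => if pvMv cs i ≤ d then pvMv cs i else pvINF), ([] : List Int)) := by
        constructor
        · show _ = (List.range (N+1)).map (pvLevelF cs d [])
          apply pvMap_range_congr
          intro i hi
          simp only [pvLevelF, List.not_mem_nil, and_false, if_false]
        · intro v hv; exact absurd hv (List.not_mem_nil)
      obtain ⟨hstf, _, hcovf⟩ := pvOuterFold cs N d hg.2 fr hmem _ hst0
      have hexpand :
          (fr.foldl (fun (st : List Int × List Int) u =>
            cs.foldl (fun (st : List Int × List Int) c =>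
              let v := u + c
              if 0 < c ∧ v ≤ ((N:Nat):Int) ∧ PySem.List.pyGetD st.1 v 0 = pvINF then
                (PySem.List.pySetD st.1 v (d+1), st.2 ++ [v])
              else st) st)
            (((List.range (N+1)).map (fun i => if pvMv cs i ≤ d then pvMv cs i else pvINF)), ([] : List Int)))
          = pvExpand cs N d fr (((List.range (N+1)).map (fun i => if pvMv cs i ≤ d then pvMv cs i else pvINF)), ([] : List Int)) := rfl
      rw [hexpand]
      set st' := pvExpand cs N d fr (((List.range (N+1)).map (fun i => if pvMv cs i ≤ d then pvMv cs i else pvINF)), ([] : List Int)) with hst'def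
      -- every level-(d+1) amount below the sentinel is discovered
      have hcomp' : d + 1 < pvINF → ∀ i : Nat, i ≤ N → pvMv cs i = d + 1 → (i:Int) ∈ st'.2 := by
        intro hdINF i hiN hival
        obtain ⟨n, rfl⟩ : ∃ n, i = n + 1 := by
          rcases i with _ | n
          · exfalso; rw [pvMv_zero] at hival; omega
          · exact ⟨n, rfl⟩
        obtain ⟨c, hc, h1, hx, hpred⟩ := pvMv_pred cs n (by omega)
        have hun : (n+1) - c.toNat ≤ N := by omega
        have hulvl : pvMv cs ((n+1) - c.toNat) = d := by omega
        have humem : (((n+1) - c.toNat : Nat) : Int) ∈ fr := hcomp hg.2 _ hun hulvl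
        have := hcovf _ humem ((n+1) - c.toNat) rfl c hc h1
          (by push_cast; omega)
          (by rw [show (n+1) - c.toNat + c.toNat = n+1 by omega]; exact hival)
        rw [show (((n+1) - c.toNat : Nat) : Int) + c = (((n+1 : Nat)) : Int) by push_cast; omega] at this
        exact this
      -- the expanded table is the table finalized through level d+1
      have htab : st'.1 = (List.range (N+1)).map (fun i => if pvMv cs i ≤ d + 1 then pvMv cs i else pvINF) := by
        rw [hstf.1]
        apply pvMap_range_congr
        intro i hi
        simp only [pvLevelF]
        have hI := pvMv_le_INF cs i
        by_cases h1 : pvMv cs i ≤ d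
        · have h1' : pvMv cs i ≤ d + 1 := by omega
          rw [if_pos h1, if_pos h1']
        · rw [if_neg h1]
          by_cases h2 : pvMv cs i = d + 1
          · have h2' : pvMv cs i ≤ d + 1 := by omega
            by_cases hdINF : d + 1 < pvINF
            · rw [if_pos ⟨h2, hcomp' hdINF i (by omega) h2⟩, if_pos h2']
              omega
            · by_cases hm : (i:Int) ∈ st'.2
              · rw [if_pos ⟨h2, hm⟩, if_pos h2']; omega
              · rw [if_neg (fun h => hm h.2), if_pos h2']; omega
          · have h2' : ¬ pvMv cs i ≤ d + 1 := by omega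
            rw [if_neg (fun h => h2 h.1), if_neg h2']
      rw [htab]
      exact ih (d+1) st'.2 (by omega) (by push_cast at hfuel ⊢; omega) hstf.2 hcomp'
    · rw [if_neg hg]
      apply pvMap_range_congr
      intro i hi
      by_cases hle : pvMv cs i ≤ d
      · rw [if_pos hle]
      · rw [if_neg hle]
        have hINF := pvMv_le_INF cs i
        rcases not_and_or.1 hg with hfr | hdINF
        · -- frontier empty while d < INF: level d is empty, so no finite value exceeds d
          rw [not_ne_iff] at hfr
          by_cases hdlt : d < pvINF
          · rcases lt_or_ge (pvMv cs i) pvINF with hfin | hinf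
            · exfalso
              obtain ⟨j, hj, hjd⟩ := pvLevel_down cs d hd (pvMv cs i - d).toNat i hfin
                (by have := pvMv_nonneg cs i; omega)
              have := hcomp hdlt j (by omega) hjd
              rw [hfr] at this
              exact absurd this (List.not_mem_nil)
            · omega
          · omega
        · rw [not_lt] at hdINF
          omega

theorem pvB_eq (limit : Int) (cs : List Int) (hl : 0 ≤ limit) :
    tiny_dp_up_to_alt limit cs = pvMtab cs limit.toNat := by
  obtain ⟨N, rfl⟩ : ∃ N : Nat, limit = ((N:Nat):Int) := ⟨limit.toNat, by omega⟩
  show pvBfsLoop ((N:Nat):Int) cs (((N:Nat):Int).toNat + 2)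
      (PySem.List.pySetD (PySem.List.pyRepeat [pvINF] (((N:Nat):Int) + 1)) 0 0) [0] 0
    = pvMtab cs ((N:Nat):Int).toNat
  rw [pvDp0 _ (by positivity), pvCons_replicate_eq_map (((N:Nat):Int)).toNat
      (fun i => if pvMv cs i ≤ 0 then pvMv cs i else pvINF)
      (by simp [pvMv_zero])
      (fun i h1 _ => by
        show (if pvMv cs i ≤ 0 then pvMv cs i else pvINF) = pvINF
        obtain ⟨n, rfl⟩ : ∃ n, i = n + 1 := ⟨i - 1, by omega⟩
        rw [if_neg (by have := pvMv_pos cs n; omega)])]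
  simp only [Int.toNat_natCast]
  rw [pvLoop_eq cs N (N + 2) 0 [0] (le_refl 0)
      (by push_cast; omega)
      (by
        intro u hu
        rw [List.mem_singleton] at hu
        exact ⟨0, by simpa using hu, Nat.zero_le _, pvMv_zero cs⟩)
      (by
        intro _ i hiN hival
        rcases i with _ | n
        · simp
        · exfalso; have := pvMv_pos cs n; omega),
    pvMtab_eq_map]

-- ===== VERDICT (by name: the statement is the Claim_ definition above) =====
theorem tiny_dp_up_to_spec : Claim_equal_tiny_dp_up_to := by
  intro limit cs _ hPre
  unfold Spec_tiny_dp_up_to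
  rw [pvA_eq limit cs hPre.1 hPre.2, pvB_eq limit cs hPre.1]
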